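-- pv_equiv track=rewrite | github.com/Sen2k9/Algorithm-and-Problem-Solving | maximum_streaks.py | getMaxStreaks
-- ===== SOURCE A (Python) =====
-- def getMaxStreaks(toss):
--     maxH = 0
--     maxT = 0
--     tempH = 0
--     tempT = 0
--     for i in range(len(toss)):
--
--         if toss[i] == "Heads":
--             tempH += 1
--             if tempH > maxH:
--                 maxH = tempH
--             tempT = 0
--         else:
--             tempT += 1
--             if tempT > maxT:
--                 maxT = tempT
--             tempH = 0
--     return maxH, maxT
-- ===== SOURCE B (Python) =====
-- def getMaxStreaks(toss):
--     maxH = 0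
--     maxT = 0
--     i = 0
--     n = len(toss)
--     while i < n:
--         is_heads = toss[i] == "Heads"
--         j = i
--         while j < n and (toss[j] == "Heads") == is_heads:
--             j += 1
--         if is_heads:
--             maxH = max(maxH, j - i)
--         else:
--             maxT = max(maxT, j - i)
--         i = j
--     return maxH, maxT
-- ===== Notes on version B (the rewrite author's own statement) =====
-- stated objective: alternative
-- what changed: B scans the list run by run (an inner scan finds each maximal block of equal-key tosses and its length updates the corresponding maximum once), instead of A's per-element temp counters reset on every switch.
import Mathlib
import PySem

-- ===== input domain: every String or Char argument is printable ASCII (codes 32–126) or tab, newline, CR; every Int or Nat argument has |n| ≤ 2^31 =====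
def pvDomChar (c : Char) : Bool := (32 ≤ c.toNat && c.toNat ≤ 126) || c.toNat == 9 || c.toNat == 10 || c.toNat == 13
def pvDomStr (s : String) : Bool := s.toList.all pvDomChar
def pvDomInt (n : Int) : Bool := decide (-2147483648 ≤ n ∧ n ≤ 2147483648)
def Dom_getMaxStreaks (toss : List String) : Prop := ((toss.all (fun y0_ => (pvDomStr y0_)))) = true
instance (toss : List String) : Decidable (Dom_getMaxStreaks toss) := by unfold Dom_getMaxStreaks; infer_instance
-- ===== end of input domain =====

-- B re-implements A by scanning run by run (alternative decomposition, same cost);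
-- the equivalence proved is about the return value; neither program mutates its argument.

-- ===== PORT A =====
-- one step of A's loop body; state = (maxH, maxT, tempH, tempT)
def aStep (s : Int × Int × Int × Int) (t : String) : Int × Int × Int × Int :=
  if t == "Heads" then
    (if s.2.2.1 + 1 > s.1 then s.2.2.1 + 1 else s.1, s.2.1, s.2.2.1 + 1, 0)
  else
    (s.1, if s.2.2.2 + 1 > s.2.1 then s.2.2.2 + 1 else s.2.1, 0, s.2.2.2 + 1)

def getMaxStreaks (toss : List String) : Int × Int :=
  let s := toss.foldl aStep (0, 0, 0, 0)
  (s.1, s.2.1)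

-- ===== PORT B =====
-- length of the leading run whose key (t == "Heads") equals k  (B's inner while scan)
def runLen (k : Bool) : List String → Int
  | [] => 0
  | t :: r => if (t == "Heads") == k then 1 + runLen k r else 0

-- the list after the leading run with key k (B's `i = j`)
def dropRun (k : Bool) : List String → List String
  | [] => []
  | t :: r => if (t == "Heads") == k then dropRun k r else t :: r

theorem dropRun_length_le (k : Bool) (l : List String) : (dropRun k l).length ≤ l.length := by
  induction l with
  | nil => simp [dropRun]
  | cons t r ih => simp only [dropRun]; split; · simp; omega
                   · simp

-- B's outer while loop: consume one maximal run per iteration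
def bLoop (mH mT : Int) : List String → Int × Int
  | [] => (mH, mT)
  | t :: rest =>
    let k := t == "Heads"
    let n : Int := 1 + runLen k rest
    if k then bLoop (max mH n) mT (dropRun k rest)
    else bLoop mH (max mT n) (dropRun k rest)
termination_by l => l.length
decreasing_by
  · exact Nat.lt_succ_of_le (dropRun_length_le _ _)
  · exact Nat.lt_succ_of_le (dropRun_length_le _ _)

def getMaxStreaks_alt (toss : List String) : Int × Int := bLoop 0 0 toss

-- ===== PRECONDITION & SPEC =====
def Spec_getMaxStreaks (toss : List String) (out : Int × Int) : Prop := out = getMaxStreaks_alt toss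
instance (toss : List String) (out : Int × Int) : Decidable (Spec_getMaxStreaks toss out) := by unfold Spec_getMaxStreaks; infer_instance

-- ===== CLAIM (what is proved, stated in full; the proofs are below) =====
def Claim_equal_getMaxStreaks : Prop := ∀ (toss : List String), Dom_getMaxStreaks toss → Spec_getMaxStreaks toss (getMaxStreaks toss)

-- ===== LEMMAS AND PROOFS =====

def projA (s : Int × Int × Int × Int) : Int × Int := (s.1, s.2.1)

def takeRun (k : Bool) : List String → List String
  | [] => []
  | t :: r => if (t == "Heads") == k then t :: takeRun k r else []

theorem takeRun_append_dropRun (k : Bool) (l : List String) :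
    takeRun k l ++ dropRun k l = l := by
  induction l with
  | nil => simp [takeRun, dropRun]
  | cons t r ih => simp only [takeRun, dropRun]; split <;> simp [ih]

theorem runLen_eq (k : Bool) (l : List String) : runLen k l = ((takeRun k l).length : Int) := by
  induction l with
  | nil => simp [runLen, takeRun]
  | cons t r ih =>
    simp only [runLen, takeRun]; split
    · simp [ih]; omega
    · simp

theorem takeRun_all (k : Bool) (l : List String) :
    ∀ t ∈ takeRun k l, (t == "Heads") = k := by
  induction l with
  | nil => simp [takeRun]
  | cons t r ih =>
    simp only [takeRun]
    split
    · rename_i h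
      intro u hu
      rcases List.mem_cons.1 hu with rfl | hu
      · simpa using h
      · exact ih u hu
    · simp

theorem dropRun_head (k : Bool) (l : List String) :
    ∀ u r, dropRun k l = u :: r → (u == "Heads") = !k := by
  induction l with
  | nil => simp [dropRun]
  | cons t rest ih =>
    simp only [dropRun]
    split
    · exact ih
    · rename_i h
      intro u r he
      cases he
      cases k <;> simp_all

theorem aStep_heads (s : Int × Int × Int × Int) (t : String) (h : (t == "Heads") = true) :
    aStep s t = (max s.1 (s.2.2.1 + 1), s.2.1, s.2.2.1 + 1, 0) := by
  simp only [aStep, h, if_true, max_def]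
  split_ifs <;> simp <;> omega

theorem aStep_tails (s : Int × Int × Int × Int) (t : String) (h : (t == "Heads") = false) :
    aStep s t = (s.1, max s.2.1 (s.2.2.2 + 1), 0, s.2.2.2 + 1) := by
  simp only [aStep, h, Bool.false_eq_true, if_false, max_def]
  split_ifs <;> simp <;> omega

theorem aStep_heads0 (mH mT : Int) (t : String) (h : (t == "Heads") = true) :
    aStep (mH, mT, 0, 0) t = (max mH 1, mT, 1, 0) := by
  rw [aStep_heads _ _ h]; norm_num

theorem aStep_tails0 (mH mT : Int) (t : String) (h : (t == "Heads") = false) :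
    aStep (mH, mT, 0, 0) t = (mH, max mT 1, 0, 1) := by
  rw [aStep_tails _ _ h]; norm_num

-- processing a block of Heads from a state with tT = 0 and tH ≤ mH
theorem headRun (run : List String) (hall : ∀ t ∈ run, (t == "Heads") = true) :
    ∀ mH mT tH, tH ≤ mH →
    List.foldl aStep (mH, mT, tH, 0) run =
      (max mH (tH + run.length), mT, tH + run.length, 0) := by
  induction run with
  | nil => intro mH mT tH h; simp [max_eq_left h]
  | cons t r ih =>
    intro mH mT tH h
    have ht : (t == "Heads") = true := hall t (List.mem_cons_self ..)
    have hstep : aStep (mH, mT, tH, 0) t = (max mH (tH + 1), mT, tH + 1, 0) := by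
      rw [aStep_heads _ _ ht]
    simp only [List.foldl_cons, hstep]
    rw [ih (fun u hu => hall u (List.mem_cons_of_mem _ hu)) _ _ _ (le_max_right _ _)]
    rw [max_assoc, max_eq_right (by omega : (tH + 1 : Int) ≤ tH + 1 + r.length)]
    have e1 : tH + 1 + (r.length : Int) = tH + ((r.length : Int) + 1) := by ring
    simp only [List.length_cons, Nat.cast_add, Nat.cast_one, e1]

theorem tailRun (run : List String) (hall : ∀ t ∈ run, (t == "Heads") = false) :
    ∀ mH mT tT, tT ≤ mT →
    List.foldl aStep (mH, mT, 0, tT) run =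
      (mH, max mT (tT + run.length), 0, tT + run.length) := by
  induction run with
  | nil => intro mH mT tT h; simp [max_eq_left h]
  | cons t r ih =>
    intro mH mT tT h
    have ht : (t == "Heads") = false := hall t (List.mem_cons_self ..)
    have hstep : aStep (mH, mT, 0, tT) t = (mH, max mT (tT + 1), 0, tT + 1) := by
      rw [aStep_tails _ _ ht]
    simp only [List.foldl_cons, hstep]
    rw [ih (fun u hu => hall u (List.mem_cons_of_mem _ hu)) _ _ _ (le_max_right _ _)]
    rw [max_assoc, max_eq_right (by omega : (tT + 1 : Int) ≤ tT + 1 + r.length)]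
    have e1 : tT + 1 + (r.length : Int) = tT + ((r.length : Int) + 1) := by ring
    simp only [List.length_cons, Nat.cast_add, Nat.cast_one, e1]

-- a pending tempH is irrelevant when the next element (if any) is not Heads
theorem resetH (l : List String) (hl : ∀ u r, l = u :: r → (u == "Heads") = false)
    (mH mT tH : Int) :
    projA (List.foldl aStep (mH, mT, tH, 0) l) = projA (List.foldl aStep (mH, mT, 0, 0) l) := by
  cases l with
  | nil => rfl
  | cons u r =>
    have hu := hl u r rfl
    simp only [List.foldl_cons, aStep_tails _ _ hu]

theorem resetT (l : List String) (hl : ∀ u r, l = u :: r → (u == "Heads") = true)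
    (mH mT tT : Int) :
    projA (List.foldl aStep (mH, mT, 0, tT) l) = projA (List.foldl aStep (mH, mT, 0, 0) l) := by
  cases l with
  | nil => rfl
  | cons u r =>
    have hu := hl u r rfl
    simp only [List.foldl_cons, aStep_heads _ _ hu]

theorem bLoop_cons (mH mT : Int) (t : String) (rest : List String) :
    bLoop mH mT (t :: rest) =
      if (t == "Heads") then bLoop (max mH (1 + runLen true rest)) mT (dropRun true rest)
      else bLoop mH (max mT (1 + runLen false rest)) (dropRun false rest) := by
  rw [bLoop]
  cases h : (t == "Heads")
  · simp
  · simp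

theorem main_lemma : ∀ (n : Nat) (l : List String), l.length = n → ∀ mH mT,
    projA (l.foldl aStep (mH, mT, 0, 0)) = bLoop mH mT l := by
  intro n
  induction n using Nat.strong_induction_on with
  | _ n ih =>
    intro l hn mH mT
    cases l with
    | nil => simp [bLoop, projA]
    | cons t rest =>
      have hlen : (dropRun (t == "Heads") rest).length < n := by
        have := dropRun_length_le (t == "Heads") rest
        simp only [← hn, List.length_cons]; omega
      rw [bLoop_cons]
      cases hkk : (t == "Heads") with
      | true =>
        have hall : ∀ u ∈ takeRun true rest, (u == "Heads") = true :=
          fun u hu => takeRun_all true rest u hu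
        have hdrop : ∀ u r, dropRun true rest = u :: r → (u == "Heads") = false := by
          intro u r he; simpa using dropRun_head true rest u r he
        simp only [if_true]
        rw [List.foldl_cons, aStep_heads0 _ _ _ hkk]
        conv_lhs => rw [← takeRun_append_dropRun true rest]
        rw [List.foldl_append, headRun _ hall _ _ _ (le_max_right _ _),
            max_assoc, max_eq_right (by omega : (1:Int) ≤ 1 + ((takeRun true rest).length : Int)),
            resetH _ hdrop, ih _ (hkk ▸ hlen) _ rfl, runLen_eq]
      | false =>
        have hall : ∀ u ∈ takeRun false rest, (u == "Heads") = false :=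
          fun u hu => takeRun_all false rest u hu
        have hdrop : ∀ u r, dropRun false rest = u :: r → (u == "Heads") = true := by
          intro u r he; simpa using dropRun_head false rest u r he
        simp only [Bool.false_eq_true, if_false]
        rw [List.foldl_cons, aStep_tails0 _ _ _ hkk]
        conv_lhs => rw [← takeRun_append_dropRun false rest]
        rw [List.foldl_append, tailRun _ hall _ _ _ (le_max_right _ _),
            max_assoc, max_eq_right (by omega : (1:Int) ≤ 1 + ((takeRun false rest).length : Int)),
            resetT _ hdrop, ih _ (hkk ▸ hlen) _ rfl, runLen_eq]

-- ===== VERDICT (by name: the statement is the Claim_ definition above) =====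
theorem getMaxStreaks_spec : Claim_equal_getMaxStreaks := by
  intro toss _
  unfold Spec_getMaxStreaks getMaxStreaks getMaxStreaks_alt
  exact main_lemma toss.length toss rfl 0 0
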